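-- pv_equiv track=rewrite | github.com/Tsarcastic/2018_code_wars | sixkyu_multi_tap.py | presses
-- ===== SOURCE A (Python) =====
-- def presses(phrase):
--     phrase = phrase.lower()
--     return_sum = 0
--     one_touch = ['a', 'd', 'g', 'j', 'm', 'p', 't', 'w', ' ', '1', '*', '#']
--     two_touch = ['b', 'e', 'h', 'k', 'n', 'q', 'u', 'x', '0']
--     three_touch = ['c', 'f', 'i', 'l', 'o', 'r', 'v', 'y']
--     four_touch = ['2', '3', '4', '5', '6', '8', 's', 'z']
--     five_touch = ['7', '9']
--
--
--     for letter in phrase: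
--         if letter in one_touch:
--             return_sum += 1
--         elif letter in two_touch:
--             return_sum += 2
--         elif letter in three_touch:
--             return_sum += 3
--         elif letter in four_touch:
--             return_sum += 4
--         elif letter in five_touch:
--             return_sum += 5
--
--     return return_sum
-- ===== SOURCE B (Python) =====
-- KEYS = ['1', 'abc2', 'def3', 'ghi4', 'jkl5', 'mno6', 'pqrs7', 'tuv8', 'wxyz9', ' 0', '*', '#']
--
--
-- def presses(phrase):
--     low = phrase.lower()
--     return sum((i + 1) * low.count(ch) for key in KEYS for i, ch in enumerate(key))
-- ===== Notes on version B (the rewrite author's own statement) =====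
-- stated objective: alternative
-- what changed: Inverted the traversal: instead of one pass over the phrase with a five-way elif cascade of list-membership tests, B iterates over the keypad layout itself and sums (position+1) * low.count(ch) for each of the 40 keypad characters, so the phrase is never dispatched character by character.
import Mathlib
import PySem

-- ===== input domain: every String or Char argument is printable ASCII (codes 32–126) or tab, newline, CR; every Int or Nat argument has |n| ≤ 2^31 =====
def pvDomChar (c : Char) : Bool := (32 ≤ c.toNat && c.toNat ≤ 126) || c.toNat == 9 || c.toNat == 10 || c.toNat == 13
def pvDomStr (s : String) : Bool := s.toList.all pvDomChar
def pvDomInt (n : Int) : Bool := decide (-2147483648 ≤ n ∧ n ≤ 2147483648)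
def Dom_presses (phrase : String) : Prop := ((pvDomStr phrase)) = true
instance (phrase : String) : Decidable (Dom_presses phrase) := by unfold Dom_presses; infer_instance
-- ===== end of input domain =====

-- B inverts the traversal: instead of one pass over the phrase dispatching each character
-- through a five-way elif cascade, it iterates over the keypad layout and sums
-- (position+1) * count of each keypad character in the lowered phrase (alternative).

-- ===== PORT A =====
def presses (phrase : String) : Int :=
  let phrase := PySem.Str.lower phrase
  let one_touch : List Char := ['a', 'd', 'g', 'j', 'm', 'p', 't', 'w', ' ', '1', '*', '#']
  let two_touch : List Char := ['b', 'e', 'h', 'k', 'n', 'q', 'u', 'x', '0']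
  let three_touch : List Char := ['c', 'f', 'i', 'l', 'o', 'r', 'v', 'y']
  let four_touch : List Char := ['2', '3', '4', '5', '6', '8', 's', 'z']
  let five_touch : List Char := ['7', '9']
  phrase.toList.foldl (fun return_sum letter =>
    if letter ∈ one_touch then return_sum + 1
    else if letter ∈ two_touch then return_sum + 2
    else if letter ∈ three_touch then return_sum + 3
    else if letter ∈ four_touch then return_sum + 4
    else if letter ∈ five_touch then return_sum + 5
    else return_sum) 0

-- ===== PORT B =====
def pvKeys : List String :=
  ["1", "abc2", "def3", "ghi4", "jkl5", "mno6", "pqrs7", "tuv8", "wxyz9", " 0", "*", "#"]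

def presses_alt (phrase : String) : Int :=
  let low := PySem.Str.lower phrase
  pvKeys.foldl (fun acc key =>
    (PySem.List.enumerate key.toList 0).foldl
      (fun acc p => acc + (p.1 + 1) * (PySem.Str.count low (String.ofList [p.2]) : Int)) acc) 0

-- ===== PRECONDITION & SPEC =====
def Spec_presses (phrase : String) (out : Int) : Prop := out = presses_alt phrase
instance (phrase : String) (out : Int) : Decidable (Spec_presses phrase out) := by unfold Spec_presses; infer_instance

-- ===== CLAIM (what is proved, stated in full; the proofs are below) =====
def Claim_equal_presses : Prop := ∀ (phrase : String), Dom_presses phrase → Spec_presses phrase (presses phrase)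

-- ===== LEMMAS AND PROOFS =====

-- A's per-character cost, read off its elif cascade.
def pvCostA (c : Char) : Int :=
  if c ∈ ['a', 'd', 'g', 'j', 'm', 'p', 't', 'w', ' ', '1', '*', '#'] then 1
  else if c ∈ ['b', 'e', 'h', 'k', 'n', 'q', 'u', 'x', '0'] then 2
  else if c ∈ ['c', 'f', 'i', 'l', 'o', 'r', 'v', 'y'] then 3
  else if c ∈ ['2', '3', '4', '5', '6', '8', 's', 'z'] then 4
  else if c ∈ ['7', '9'] then 5
  else 0

-- The (weight, char) pairs B's nested loop visits, flattened.
def pvTable : List (Int × Char) :=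
  [(1,'1'), (1,'a'),(2,'b'),(3,'c'),(4,'2'), (1,'d'),(2,'e'),(3,'f'),(4,'3'),
   (1,'g'),(2,'h'),(3,'i'),(4,'4'), (1,'j'),(2,'k'),(3,'l'),(4,'5'),
   (1,'m'),(2,'n'),(3,'o'),(4,'6'), (1,'p'),(2,'q'),(3,'r'),(4,'s'),(5,'7'),
   (1,'t'),(2,'u'),(3,'v'),(4,'8'), (1,'w'),(2,'x'),(3,'y'),(4,'z'),(5,'9'),
   (1,' '),(2,'0'), (1,'*'), (1,'#')]

-- str.count with a single-character needle is the element count.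
theorem pvCountGo_single (c : Char) :
    ∀ (fuel : Nat) (l : List Char) (acc : Nat), l.length ≤ fuel →
      PySem.Chars.count.go [c] fuel l acc = acc + l.count c := by
  intro fuel
  induction fuel with
  | zero => intro l acc h; cases l with
    | nil => simp [PySem.Chars.count.go]
    | cons a t => simp at h
  | succ n ih =>
    intro l acc h
    cases l with
    | nil => simp [PySem.Chars.count.go]
    | cons a t =>
      have hlen : t.length ≤ n := by simp at h; omega
      simp only [PySem.Chars.count.go]
      by_cases hc : c = a
      · subst hc
        have hp : List.isPrefixOf [c] (c :: t) = true := by simp [List.isPrefixOf]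
        rw [hp]
        simp only [if_true, List.length_cons, List.length_nil, Nat.zero_add, List.drop_one,
          List.tail_cons]
        rw [ih t (acc + 1) hlen]
        simp
        omega
      · have hp : List.isPrefixOf [c] (a :: t) = false := by
          simp [List.isPrefixOf]; exact fun h' => absurd h' hc
        rw [hp]
        simp only [Bool.false_eq_true, if_false]
        rw [ih t acc hlen]
        have : (a == c) = false := by simp [Ne.symm hc]
        simp [List.count_cons, this]

theorem pvCount_single (l : List Char) (c : Char) :
    PySem.Chars.count l [c] = l.count c := by
  simp [PySem.Chars.count]
  simpa using pvCountGo_single c l.length l 0 le_rfl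

-- B as a sum over pvTable of weight * element count of the lowered phrase.
set_option maxHeartbeats 1000000 in
theorem pvBalt_eq (phrase : String) :
    presses_alt phrase =
      (pvTable.map (fun p =>
        p.1 * (((PySem.Str.lower phrase).toList.count p.2 : Nat) : Int))).sum := by
  have e1 : PySem.List.enumerate "1".toList 0 = [(0,'1')] := by decide
  have e2 : PySem.List.enumerate "abc2".toList 0 = [(0,'a'),(1,'b'),(2,'c'),(3,'2')] := by decide
  have e3 : PySem.List.enumerate "def3".toList 0 = [(0,'d'),(1,'e'),(2,'f'),(3,'3')] := by decide
  have e4 : PySem.List.enumerate "ghi4".toList 0 = [(0,'g'),(1,'h'),(2,'i'),(3,'4')] := by decide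
  have e5 : PySem.List.enumerate "jkl5".toList 0 = [(0,'j'),(1,'k'),(2,'l'),(3,'5')] := by decide
  have e6 : PySem.List.enumerate "mno6".toList 0 = [(0,'m'),(1,'n'),(2,'o'),(3,'6')] := by decide
  have e7 : PySem.List.enumerate "pqrs7".toList 0 = [(0,'p'),(1,'q'),(2,'r'),(3,'s'),(4,'7')] := by decide
  have e8 : PySem.List.enumerate "tuv8".toList 0 = [(0,'t'),(1,'u'),(2,'v'),(3,'8')] := by decide
  have e9 : PySem.List.enumerate "wxyz9".toList 0 = [(0,'w'),(1,'x'),(2,'y'),(3,'z'),(4,'9')] := by decide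
  have e10 : PySem.List.enumerate " 0".toList 0 = [(0,' '),(1,'0')] := by decide
  have e11 : PySem.List.enumerate "*".toList 0 = [(0,'*')] := by decide
  have e12 : PySem.List.enumerate "#".toList 0 = [(0,'#')] := by decide
  simp only [presses_alt, pvKeys, pvTable, List.foldl_cons, List.foldl_nil,
    e1, e2, e3, e4, e5, e6, e7, e8, e9, e10, e11, e12,
    PySem.Str.count, String.toList_ofList, pvCount_single,
    List.map_cons, List.map_nil, List.sum_cons, List.sum_nil]
  push_cast
  ring

-- the table-weighted indicator sum at one character.
def pvG (c : Char) : Int :=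
  (pvTable.map (fun p => p.1 * (if (c == p.2) = true then (1:Int) else 0))).sum

theorem pvTableSum_cons (c : Char) (t : List Char) :
    (pvTable.map (fun p => p.1 * (((c :: t).count p.2 : Nat) : Int))).sum =
      pvG c + (pvTable.map (fun p => p.1 * ((t.count p.2 : Nat) : Int))).sum := by
  have hfun : (fun (p : Int × Char) => p.1 * (((c :: t).count p.2 : Nat) : Int)) =
      fun p => p.1 * (if (c == p.2) = true then (1:Int) else 0) + p.1 * ((t.count p.2 : Nat) : Int) := by
    funext p
    rw [List.count_cons]
    push_cast
    split_ifs <;> ring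
  rw [hfun, PySem.List.sum_map_add_int, pvG]

-- On every 7-bit character the table-weighted indicator sum equals A's cascade cost,
-- and lowering stays 7-bit.
set_option maxRecDepth 8192 in
theorem pvKey128 : ∀ n : Fin 128,
    pvG (Char.ofNat n.val) = pvCostA (Char.ofNat n.val) ∧
    (PySem.Chars.lowerChar (Char.ofNat n.val)).toNat < 128 := by decide

theorem pvG_eq (c : Char) (h : c.toNat < 128) : pvG c = pvCostA c := by
  have := (pvKey128 ⟨c.toNat, h⟩).1
  simpa [Char.ofNat_toNat] using this

theorem pvLower_lt (c : Char) (h : c.toNat < 128) :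
    (PySem.Chars.lowerChar c).toNat < 128 := by
  have := (pvKey128 ⟨c.toNat, h⟩).2
  simpa [Char.ofNat_toNat] using this

-- A's fold is the per-character cost sum.
theorem pvA_foldl (l : List Char) (a : Int) :
    l.foldl (fun return_sum letter =>
      if letter ∈ ['a', 'd', 'g', 'j', 'm', 'p', 't', 'w', ' ', '1', '*', '#'] then return_sum + 1
      else if letter ∈ ['b', 'e', 'h', 'k', 'n', 'q', 'u', 'x', '0'] then return_sum + 2
      else if letter ∈ ['c', 'f', 'i', 'l', 'o', 'r', 'v', 'y'] then return_sum + 3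
      else if letter ∈ ['2', '3', '4', '5', '6', '8', 's', 'z'] then return_sum + 4
      else if letter ∈ ['7', '9'] then return_sum + 5
      else return_sum) a = a + (l.map pvCostA).sum := by
  induction l generalizing a with
  | nil => simp
  | cons c t ih =>
    simp only [List.foldl_cons, List.map_cons, List.sum_cons, ih, pvCostA]
    split_ifs <;> ring

-- table sum = cascade sum on 7-bit lists.
theorem pvSums_eq (l : List Char) (h : ∀ c ∈ l, c.toNat < 128) :
    (pvTable.map (fun p => p.1 * ((l.count p.2 : Nat) : Int))).sum = (l.map pvCostA).sum := by
  induction l with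
  | nil => decide
  | cons c t ih =>
    rw [pvTableSum_cons, ih (fun x hx => h x (List.mem_cons_of_mem _ hx))]
    simp [pvG_eq c (h c (List.mem_cons_self))]

-- ===== VERDICT (by name: the statement is the Claim_ definition above) =====
theorem presses_spec : Claim_equal_presses := by
  intro phrase hdom
  unfold Spec_presses presses
  rw [pvBalt_eq, pvA_foldl]
  have h128 : ∀ c ∈ (PySem.Str.lower phrase).toList, c.toNat < 128 := by
    intro c hc
    rw [PySem.Str.toList_lower] at hc
    simp only [PySem.Chars.lower, List.mem_map] at hc
    obtain ⟨d, hd, rfl⟩ := hc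
    have hdc : pvDomChar d = true := by
      unfold Dom_presses pvDomStr at hdom
      exact List.all_eq_true.mp hdom d hd
    have : d.toNat < 128 := by simp [pvDomChar] at hdc; omega
    exact pvLower_lt d this
  rw [pvSums_eq _ h128]
  ring
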